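-- pv_equiv track=rewrite | github.com/theejer/safe-passage | backend/app/services/pipeline_backend.py | _is_no_issue_item
-- ===== SOURCE A (Python) =====
-- def _is_no_issue_item(risk: str | None, details: str | None, mitigation: str | None, severity: str) -> bool:
--     if severity == "No":
--         return True
--     combined = " ".join([(risk or ""), (details or ""), (mitigation or "")]).strip().lower()
--     if not combined:
--         return True
--     no_issue_markers = [
--         "no issue",
--         "no issues",
--         "no risk",
--         "no risks",
--         "nothing significant",
--         "nothing notable",
--         "safe overall",
--         "all clear",
--     ]
--     return any(marker in combined for marker in no_issue_markers)
-- ===== SOURCE B (Python) =====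
-- _NO_ISSUE_PREFIXES = (
--     "no issue",
--     "no risk",
--     "nothing significant",
--     "nothing notable",
--     "safe overall",
--     "all clear",
-- )
--
--
-- def _is_no_issue_item(risk, details, mitigation, severity):
--     if severity == "No":
--         return True
--     combined = " ".join([(risk or ""), (details or ""), (mitigation or "")]).strip().lower()
--     if not combined:
--         return True
--     # single left-to-right pass: at each position, check the six prefixes
--     # (the plural markers are redundant: they contain their singular forms)
--     for i in range(len(combined)):
--         for m in _NO_ISSUE_PREFIXES:
--             if combined.startswith(m, i):
--                 return True
--     return False
-- ===== Notes on version B (the rewrite author's own statement) =====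
-- stated objective: alternative
-- what changed: Replaces the eight independent 'marker in combined' substring scans with one left-to-right pass over combined that checks six marker prefixes at each position (the plural markers are dropped since they contain their singular forms).
import Mathlib
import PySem

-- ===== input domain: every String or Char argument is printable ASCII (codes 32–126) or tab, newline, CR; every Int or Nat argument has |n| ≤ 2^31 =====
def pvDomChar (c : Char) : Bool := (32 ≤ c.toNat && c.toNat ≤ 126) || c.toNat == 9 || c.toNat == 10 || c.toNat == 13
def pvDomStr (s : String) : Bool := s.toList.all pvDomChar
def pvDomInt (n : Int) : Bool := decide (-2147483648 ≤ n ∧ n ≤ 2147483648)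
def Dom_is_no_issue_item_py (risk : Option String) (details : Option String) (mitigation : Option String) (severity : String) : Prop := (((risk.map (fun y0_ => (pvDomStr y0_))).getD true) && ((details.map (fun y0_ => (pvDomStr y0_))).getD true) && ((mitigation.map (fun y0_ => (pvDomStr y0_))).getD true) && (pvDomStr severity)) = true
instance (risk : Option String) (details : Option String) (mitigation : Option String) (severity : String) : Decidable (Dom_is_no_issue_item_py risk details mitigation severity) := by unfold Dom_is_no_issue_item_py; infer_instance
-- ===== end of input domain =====

-- B replaces A's eight independent substring scans by one left-to-right pass
-- that checks six marker prefixes at each position (alternative, same cost).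


-- ===== PORT A =====
def is_no_issue_item_py (risk : Option String) (details : Option String) (mitigation : Option String) (severity : String) : Bool :=
  if severity == "No" then true
  else
    let combined := PySem.Str.lower (PySem.Str.strip (PySem.Str.join " " [risk.getD "", details.getD "", mitigation.getD ""]))
    if combined == "" then true
    else
      ["no issue", "no issues", "no risk", "no risks", "nothing significant",
       "nothing notable", "safe overall", "all clear"].any
        (fun marker => PySem.Str.isIn marker combined)

-- ===== PORT B =====
-- the six prefixes, as char lists (B scans the combined text position by position)
def noIssuePrefixes : List (List Char) :=
  ["no issue".toList, "no risk".toList, "nothing significant".toList,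
   "nothing notable".toList, "safe overall".toList, "all clear".toList]

-- the inner/outer loop of B: walk the suffixes of l; at each, test the six prefixes
def noIssueScan : List Char → Bool
  | [] => false
  | c :: rest => noIssuePrefixes.any (fun m => m.isPrefixOf (c :: rest)) || noIssueScan rest

def is_no_issue_item_py_alt (risk : Option String) (details : Option String) (mitigation : Option String) (severity : String) : Bool :=
  if severity == "No" then true
  else
    let combined := PySem.Str.lower (PySem.Str.strip (PySem.Str.join " " [risk.getD "", details.getD "", mitigation.getD ""]))
    if combined == "" then true
    else noIssueScan combined.toList

-- ===== PRECONDITION & SPEC =====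
def Spec_is_no_issue_item_py (risk : Option String) (details : Option String) (mitigation : Option String) (severity : String) (out : Bool) : Prop := out = is_no_issue_item_py_alt risk details mitigation severity
instance (risk : Option String) (details : Option String) (mitigation : Option String) (severity : String) (out : Bool) : Decidable (Spec_is_no_issue_item_py risk details mitigation severity out) := by unfold Spec_is_no_issue_item_py; infer_instance

-- ===== CLAIM (what is proved, stated in full; the proofs are below) =====
def Claim_equal_is_no_issue_item_py : Prop := ∀ (risk : Option String) (details : Option String) (mitigation : Option String) (severity : String), Dom_is_no_issue_item_py risk details mitigation severity → Spec_is_no_issue_item_py risk details mitigation severity (is_no_issue_item_py risk details mitigation severity)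

-- ===== LEMMAS AND PROOFS =====

-- B's scan finds exactly the nonempty-marker infixes
theorem noIssueScan_iff (l : List Char) :
    noIssueScan l = true ↔ ∃ m ∈ noIssuePrefixes, m <:+: l := by
  induction l with
  | nil =>
    simp only [noIssueScan, List.infix_nil]
    constructor
    · intro h; cases h
    · rintro ⟨m, hm, rfl⟩; revert hm; decide
  | cons c rest ih =>
    simp only [noIssueScan, Bool.or_eq_true, List.any_eq_true, ih,
      List.isPrefixOf_iff_prefix, List.infix_cons_iff]
    constructor
    · rintro (⟨m, hm, h⟩ | ⟨m, hm, h⟩)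
      · exact ⟨m, hm, Or.inl h⟩
      · exact ⟨m, hm, Or.inr h⟩
    · rintro ⟨m, hm, h | h⟩
      · exact Or.inl ⟨m, hm, h⟩
      · exact Or.inr ⟨m, hm, h⟩

-- A's eight-marker any agrees with B's six-prefix scan on every string
theorem markers_eq (s : String) :
    (["no issue", "no issues", "no risk", "no risks", "nothing significant",
      "nothing notable", "safe overall", "all clear"].any
        (fun marker => PySem.Str.isIn marker s)) = noIssueScan s.toList := by
  rcases Bool.eq_false_or_eq_true (noIssueScan s.toList) with h | h <;> rw [h]
  swap
  · rw [List.any_eq_false]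
    intro m hm
    rw [Bool.not_eq_true, ← Bool.not_eq_true, PySem.Str.isIn_iff_infix]
    intro hinf
    rw [← Bool.not_eq_true, noIssueScan_iff] at h
    apply h
    -- each of A's eight markers contains one of B's six prefixes
    fin_cases hm
    · exact ⟨"no issue".toList, by decide, hinf⟩
    · exact ⟨"no issue".toList, by decide, List.IsInfix.trans (by decide) hinf⟩
    · exact ⟨"no risk".toList, by decide, hinf⟩
    · exact ⟨"no risk".toList, by decide, List.IsInfix.trans (by decide) hinf⟩
    · exact ⟨"nothing significant".toList, by decide, hinf⟩
    · exact ⟨"nothing notable".toList, by decide, hinf⟩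
    · exact ⟨"safe overall".toList, by decide, hinf⟩
    · exact ⟨"all clear".toList, by decide, hinf⟩
  · rw [noIssueScan_iff] at h
    obtain ⟨m, hm, hinf⟩ := h
    rw [List.any_eq_true]
    -- each of B's six prefixes is itself one of A's markers
    fin_cases hm
    · exact ⟨"no issue", by decide, by rw [PySem.Str.isIn_iff_infix]; exact hinf⟩
    · exact ⟨"no risk", by decide, by rw [PySem.Str.isIn_iff_infix]; exact hinf⟩
    · exact ⟨"nothing significant", by decide, by rw [PySem.Str.isIn_iff_infix]; exact hinf⟩
    · exact ⟨"nothing notable", by decide, by rw [PySem.Str.isIn_iff_infix]; exact hinf⟩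
    · exact ⟨"safe overall", by decide, by rw [PySem.Str.isIn_iff_infix]; exact hinf⟩
    · exact ⟨"all clear", by decide, by rw [PySem.Str.isIn_iff_infix]; exact hinf⟩

-- ===== VERDICT (by name: the statement is the Claim_ definition above) =====
theorem is_no_issue_item_py_spec : Claim_equal_is_no_issue_item_py := by
  intro risk details mitigation severity _
  unfold Spec_is_no_issue_item_py is_no_issue_item_py is_no_issue_item_py_alt
  by_cases h1 : (severity == "No") = true
  · simp only [h1, if_true]
  · simp only [h1, Bool.false_eq_true, if_false]
    by_cases h2 : (PySem.Str.lower (PySem.Str.strip (PySem.Str.join " " [risk.getD "", details.getD "", mitigation.getD ""])) == "") = true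
    · simp only [h2, if_true]
    · simp only [h2, Bool.false_eq_true, if_false]
      exact markers_eq _
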